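-- pv_equiv track=rewrite | github.com/sophus0505/Kattis | trik/trik.py | borko
-- ===== SOURCE A (Python) =====
-- def borko(line):
--     cup = [True, False, False]
--     for move in line:
--         if move == "A":
--             a = cup[0]
--             cup[0] = cup[1]
--             cup[1] = a
--         elif move == "B":
--             a = cup[2]
--             cup[2] = cup[1]
--             cup[1] = a
--         else:
--             a = cup[2]
--             cup[2] = cup[0]
--             cup[0] = a
--     if cup[0]:
--         return 1
--     elif cup[1]:
--         return 2
--     else:
--         return 3
-- ===== SOURCE B (Python) =====
-- def borko(line):
--     # Divide-and-conquer: each move is a permutation of {0,1,2}; compose the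
--     # permutations of the two halves, then apply the whole-string permutation to 0.
--     def move_perm(c):
--         if c == "A":
--             return (1, 0, 2)
--         if c == "B":
--             return (0, 2, 1)
--         return (2, 1, 0)
--
--     def perm_of(s):
--         if len(s) == 0:
--             return (0, 1, 2)
--         if len(s) == 1:
--             return move_perm(s[0])
--         mid = len(s) // 2
--         f = perm_of(s[:mid])
--         g = perm_of(s[mid:])
--         return (g[f[0]], g[f[1]], g[f[2]])
--
--     return perm_of(line)[0] + 1
-- ===== Notes on version B (the rewrite author's own statement) =====
-- stated objective: alternative
-- what changed: Instead of simulating the cup state move by move, B maps each move to a permutation of {0,1,2} and composes the permutations of the two halves of the string by divide-and-conquer, finally applying the composed whole-string permutation to position 0.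
import Mathlib
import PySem

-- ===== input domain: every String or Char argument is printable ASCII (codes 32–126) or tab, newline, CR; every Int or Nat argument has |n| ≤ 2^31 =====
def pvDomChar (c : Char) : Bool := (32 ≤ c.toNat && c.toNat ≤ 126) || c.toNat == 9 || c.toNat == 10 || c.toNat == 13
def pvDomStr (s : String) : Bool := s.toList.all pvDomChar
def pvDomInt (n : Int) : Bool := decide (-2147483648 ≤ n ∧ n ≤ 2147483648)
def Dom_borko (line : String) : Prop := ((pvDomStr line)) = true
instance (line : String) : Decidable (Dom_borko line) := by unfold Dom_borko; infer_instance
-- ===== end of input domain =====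

-- B replaces A's move-by-move cup simulation with divide-and-conquer composition of S3 permutations (objective: alternative).

-- ===== PORT A =====
-- one move of A: swap the two cup booleans the move names
def borkoStepA (cup : Bool × Bool × Bool) (move : Char) : Bool × Bool × Bool :=
  if move = 'A' then (cup.2.1, cup.1, cup.2.2)
  else if move = 'B' then (cup.1, cup.2.2, cup.2.1)
  else (cup.2.2, cup.2.1, cup.1)

def borko (line : String) : Int :=
  let cup := line.toList.foldl borkoStepA (true, false, false)
  if cup.1 then 1 else if cup.2.1 then 2 else 3

-- ===== PORT B =====
-- tuple indexing g[i] for i ∈ {0,1,2}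
def appPerm (g : Int × Int × Int) (i : Int) : Int :=
  if i = 0 then g.1 else if i = 1 then g.2.1 else g.2.2

def movePerm (c : Char) : Int × Int × Int :=
  if c = 'A' then (1, 0, 2)
  else if c = 'B' then (0, 2, 1)
  else (2, 1, 0)

def permOf (s : List Char) : Int × Int × Int :=
  match s with
  | [] => (0, 1, 2)
  | [c] => movePerm c
  | c1 :: c2 :: rest =>
    let s' := c1 :: c2 :: rest
    let mid := s'.length / 2
    let f := permOf (s'.take mid)
    let g := permOf (s'.drop mid)
    (appPerm g f.1, appPerm g f.2.1, appPerm g f.2.2)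
termination_by s.length
decreasing_by
  · simp [List.length_take]; omega
  · simp [List.length_drop]; omega

def borko_alt (line : String) : Int :=
  (permOf line.toList).1 + 1

-- ===== PRECONDITION & SPEC =====
def Spec_borko (line : String) (out : Int) : Prop := out = borko_alt line
instance (line : String) (out : Int) : Decidable (Spec_borko line out) := by unfold Spec_borko; infer_instance

-- ===== CLAIM (what is proved, stated in full; the proofs are below) =====
def Claim_equal_borko : Prop := ∀ (line : String), Dom_borko line → Spec_borko line (borko line)

-- ===== LEMMAS AND PROOFS =====

-- proof-only helper: the ball position after one move
def posStep (pos : Int) (move : Char) : Int :=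
  if move = 'A' then (if pos = 0 then 1 else if pos = 1 then 0 else pos)
  else if move = 'B' then (if pos = 1 then 2 else if pos = 2 then 1 else pos)
  else (if pos = 0 then 2 else if pos = 2 then 0 else pos)

def okPos (p : Int) : Prop := p = 0 ∨ p = 1 ∨ p = 2

-- permOf computes the left-to-right action of the move sequence on any valid position
theorem permOf_app (s : List Char) :
    ∀ p : Int, okPos p → appPerm (permOf s) p = s.foldl posStep p := by
  induction s using permOf.induct with
  | case1 =>
    intro p hp
    rcases hp with h | h | h <;> subst h <;> simp [permOf, appPerm]
  | case2 c =>
    intro p hp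
    rcases hp with h | h | h <;> subst h <;>
      simp only [permOf, movePerm, appPerm, List.foldl, posStep] <;>
      split_ifs <;> simp_all
  | case3 c1 c2 rest s' mid ih1 ih2 =>
    intro p hp
    show appPerm (permOf (c1 :: c2 :: rest)) p = (c1 :: c2 :: rest).foldl posStep p
    have hperm : permOf (c1 :: c2 :: rest) =
        (appPerm (permOf (List.drop mid s')) (permOf (List.take mid s')).1,
         appPerm (permOf (List.drop mid s')) (permOf (List.take mid s')).2.1,
         appPerm (permOf (List.drop mid s')) (permOf (List.take mid s')).2.2) := by
      rw [permOf]
    have hsplit : (c1 :: c2 :: rest) = List.take mid s' ++ List.drop mid s' := by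
      simp [s']
    have hq : okPos (appPerm (permOf (List.take mid s')) p) := by
      rw [ih1 p hp]
      clear ih1 ih2 hsplit hperm
      induction List.take mid s' generalizing p with
      | nil => exact hp
      | cons a t iht =>
        apply iht
        rcases hp with h | h | h <;> subst h <;>
          simp only [posStep] <;> split_ifs <;> simp [okPos]
    have step : appPerm (permOf (c1 :: c2 :: rest)) p =
        appPerm (permOf (List.drop mid s')) (appPerm (permOf (List.take mid s')) p) := by
      rw [hperm]
      rcases hp with h | h | h <;> subst h <;> simp [appPerm]
    rw [step, ih1 p hp, ← ih1 p hp, ih2 _ hq, ih1 p hp]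
    conv_rhs => rw [hsplit]
    rw [List.foldl_append]

-- relate A's cup state to the ball position
def cupRel (cup : Bool × Bool × Bool) (pos : Int) : Prop :=
  (cup = (true, false, false) ∧ pos = 0) ∨
  (cup = (false, true, false) ∧ pos = 1) ∨
  (cup = (false, false, true) ∧ pos = 2)

theorem cupStep_rel (cup : Bool × Bool × Bool) (pos : Int) (c : Char)
    (h : cupRel cup pos) : cupRel (borkoStepA cup c) (posStep pos c) := by
  rcases h with ⟨hc, hp⟩ | ⟨hc, hp⟩ | ⟨hc, hp⟩ <;> subst hc <;> subst hp <;>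
    simp only [borkoStepA, posStep, cupRel] <;> split_ifs <;> simp_all

theorem cupFold_rel (l : List Char) (cup : Bool × Bool × Bool) (pos : Int)
    (h : cupRel cup pos) :
    cupRel (l.foldl borkoStepA cup) (l.foldl posStep pos) := by
  induction l generalizing cup pos with
  | nil => exact h
  | cons c t ih => exact ih _ _ (cupStep_rel cup pos c h)

-- ===== VERDICT (by name: the statement is the Claim_ definition above) =====
theorem borko_spec : Claim_equal_borko := by
  intro line _
  unfold Spec_borko borko borko_alt
  have hperm := permOf_app line.toList 0 (Or.inl rfl)
  have hrel := cupFold_rel line.toList (true, false, false) 0 (Or.inl ⟨rfl, rfl⟩)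
  have h0 : appPerm (permOf line.toList) 0 = (permOf line.toList).1 := by
    simp [appPerm]
  rw [h0] at hperm
  rcases hrel with ⟨hc, hp⟩ | ⟨hc, hp⟩ | ⟨hc, hp⟩ <;> rw [hc] <;>
    rw [hp] at hperm <;> rw [hperm] <;> simp
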